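-- pv_equiv track=rewrite | github.com/Sch0bl/sopa-letras-backtracking | SopitaPiola.py | generaDiagonales
-- ===== SOURCE A (Python) =====
-- def validaPosicion(n, Posicion):
--     if 0 <= Posicion[0] < n:
--         if 0 <= Posicion[1] < n:
--             return True
--         else:
--             return False
--     else:
--         return False
--
-- def generaDiagonales(n, Longitud, complejidad):
--     listaPosiciones = []
--     for i in range(-(n-1),n):
--         Posiciones = [ (filacolumna + i , filacolumna) for filacolumna in range(n)]
--         listaPosiciones.append([ Posicion for Posicion in Posiciones if validaPosicion(n, Posicion)])
--     if complejidad != 1: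
--         for i in range(2*n - 1):
--             Posiciones = [(filacolumna,-(filacolumna - i)) for filacolumna in range(n)]
--             listaPosiciones.append([ Posicion for Posicion in Posiciones if validaPosicion(n, Posicion)])
--     return [Posiciones for Posiciones in listaPosiciones if len(Posiciones) >= Longitud]
-- ===== SOURCE B (Python) =====
-- def generaDiagonales(n, Longitud, complejidad):
--     # Bucket sweep: one pass over all cells groups them by r-c (main) and r+c
--     # (anti) into dicts of lists, then diagonals are read off by key in order.
--     cells = [(r, c) for r in range(n) for c in range(n)]
--     main = {}
--     for cell in cells:
--         main.setdefault(cell[0] - cell[1], []).append(cell)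
--     anti = {}
--     for cell in cells:
--         anti.setdefault(cell[0] + cell[1], []).append(cell)
--     res = [main.get(d, []) for d in range(-(n - 1), n)]
--     if complejidad != 1:
--         res += [anti.get(s, []) for s in range(2 * n - 1)]
--     return [diag for diag in res if len(diag) >= Longitud]
-- ===== Notes on version B (the rewrite author's own statement) =====
-- stated objective: alternative
-- what changed: B does a single sweep over all grid cells, bucketing each cell into dicts keyed by r-c (main) and r+c (anti), then reads the diagonals off the dicts by key in order, instead of A's per-diagonal candidate generation with a validity test for every candidate.
import Mathlib
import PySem

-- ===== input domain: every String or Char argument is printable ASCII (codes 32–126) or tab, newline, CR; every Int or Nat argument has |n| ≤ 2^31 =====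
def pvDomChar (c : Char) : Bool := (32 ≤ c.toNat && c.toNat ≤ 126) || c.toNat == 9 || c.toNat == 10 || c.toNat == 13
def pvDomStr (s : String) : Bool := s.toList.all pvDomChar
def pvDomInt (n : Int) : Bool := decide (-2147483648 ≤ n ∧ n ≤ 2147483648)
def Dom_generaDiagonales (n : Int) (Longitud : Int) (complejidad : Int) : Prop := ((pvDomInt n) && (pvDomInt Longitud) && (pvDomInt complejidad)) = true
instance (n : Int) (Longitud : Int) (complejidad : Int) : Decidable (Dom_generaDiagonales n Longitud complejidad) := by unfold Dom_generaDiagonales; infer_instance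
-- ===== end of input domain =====

-- B replaces A's per-diagonal generate-and-filter by a single bucket sweep over all
-- cells, grouping them into dicts keyed by r-c / r+c (objective: alternative).

-- ===== PORT A =====
def validaPosicion (n : Int) (Posicion : Int × Int) : Bool :=
  if 0 ≤ Posicion.1 ∧ Posicion.1 < n then
    if 0 ≤ Posicion.2 ∧ Posicion.2 < n then true else false
  else false

def generaDiagonales (n : Int) (Longitud : Int) (complejidad : Int) : List (List (Int × Int)) :=
  let listaPosiciones : List (List (Int × Int)) :=
    (PySem.List.pyRange (-(n-1)) n 1).foldl (fun acc i =>
      let Posiciones := (PySem.List.pyRange 0 n 1).map (fun filacolumna => (filacolumna + i, filacolumna))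
      acc ++ [Posiciones.filter (fun Posicion => validaPosicion n Posicion)]) []
  let listaPosiciones : List (List (Int × Int)) :=
    if complejidad ≠ 1 then
      (PySem.List.pyRange 0 (2*n - 1) 1).foldl (fun acc i =>
        let Posiciones := (PySem.List.pyRange 0 n 1).map (fun filacolumna => (filacolumna, -(filacolumna - i)))
        acc ++ [Posiciones.filter (fun Posicion => validaPosicion n Posicion)]) listaPosiciones
    else listaPosiciones
  listaPosiciones.filter (fun Posiciones => Longitud ≤ (Posiciones.length : Int))

-- ===== PORT B =====
-- setdefault(k, []).append(cell) is ported as Dict.modify k [] (· ++ [cell]) (exact: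
-- absent key appends f [] at the end, present key updates in place).
def generaDiagonales_alt (n : Int) (Longitud : Int) (complejidad : Int) : List (List (Int × Int)) :=
  let cells : List (Int × Int) :=
    (PySem.List.pyRange 0 n 1).flatMap (fun r => (PySem.List.pyRange 0 n 1).map (fun c => (r, c)))
  let main : PySem.Dict Int (List (Int × Int)) :=
    cells.foldl (fun d cell => d.modify (cell.1 - cell.2) [] (· ++ [cell])) PySem.Dict.empty
  let anti : PySem.Dict Int (List (Int × Int)) :=
    cells.foldl (fun d cell => d.modify (cell.1 + cell.2) [] (· ++ [cell])) PySem.Dict.empty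
  let res : List (List (Int × Int)) := (PySem.List.pyRange (-(n-1)) n 1).map (fun d => main.getD d [])
  let res : List (List (Int × Int)) :=
    if complejidad ≠ 1 then res ++ (PySem.List.pyRange 0 (2*n - 1) 1).map (fun s => anti.getD s [])
    else res
  res.filter (fun diag => Longitud ≤ (diag.length : Int))

-- ===== PRECONDITION & SPEC =====
def Spec_generaDiagonales (n : Int) (Longitud : Int) (complejidad : Int) (out : List (List (Int × Int))) : Prop := out = generaDiagonales_alt n Longitud complejidad
instance (n : Int) (Longitud : Int) (complejidad : Int) (out : List (List (Int × Int))) : Decidable (Spec_generaDiagonales n Longitud complejidad out) := by unfold Spec_generaDiagonales; infer_instance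

-- ===== CLAIM (what is proved, stated in full; the proofs are below) =====
def Claim_equal_generaDiagonales : Prop := ∀ (n : Int) (Longitud : Int) (complejidad : Int), Dom_generaDiagonales n Longitud complejidad → Spec_generaDiagonales n Longitud complejidad (generaDiagonales n Longitud complejidad)

-- ===== LEMMAS AND PROOFS =====

-- Filtering a step-1 range by an interval condition clamps the range bounds.
theorem filter_interval_pyRange_aux (lo hi : Int) : ∀ (k : Nat) (a b : Int), (b - a).toNat = k →
    (PySem.List.pyRange a b 1).filter (fun x => decide (lo ≤ x ∧ x < hi))
      = PySem.List.pyRange (max a lo) (min b hi) 1 := by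
  intro k
  induction k with
  | zero =>
    intro a b h
    rw [PySem.List.pyRange_one_eq_nil (by omega), PySem.List.pyRange_one_eq_nil (by omega)]
    simp
  | succ m ih =>
    intro a b h
    rw [PySem.List.pyRange_one_cons (by omega)]
    by_cases hc : lo ≤ a ∧ a < hi
    · have hmax : max a lo = a := by omega
      have hlt : a < min b hi := by omega
      have hstep : max (a+1) lo = a + 1 := by omega
      rw [List.filter_cons_of_pos (by simpa using hc), ih (a+1) b (by omega), hmax,
        PySem.List.pyRange_one_cons hlt, hstep]
    · rw [List.filter_cons_of_neg (by simpa using hc), ih (a+1) b (by omega)]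
      by_cases hlo : a < lo
      · have hstep : max (a+1) lo = max a lo := by omega
        rw [hstep]
      · rw [PySem.List.pyRange_one_eq_nil (by omega), PySem.List.pyRange_one_eq_nil (by omega)]

theorem filter_interval_pyRange (lo hi a b : Int) :
    (PySem.List.pyRange a b 1).filter (fun x => decide (lo ≤ x ∧ x < hi))
      = PySem.List.pyRange (max a lo) (min b hi) 1 :=
  filter_interval_pyRange_aux lo hi (b - a).toNat a b rfl

-- A's filtered main diagonal i equals the clamped-range closed form.
theorem main_diag_eq (n i : Int) :
    ((PySem.List.pyRange 0 n 1).map (fun fc => (fc + i, fc))).filter (fun P => validaPosicion n P)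
      = (PySem.List.pyRange (max 0 (-i)) (min n (n - i)) 1).map (fun c => (c + i, c)) := by
  rw [List.filter_map]
  congr 1
  rw [List.filter_congr (q := fun x => decide (-i ≤ x ∧ x < n - i))
      (by intro x hx
          have hb := (PySem.List.mem_pyRange_one).1 hx
          simp only [validaPosicion, Function.comp, Bool.if_false_right, Bool.and_true]
          rw [Bool.eq_iff_iff]
          simp only [Bool.and_eq_true, decide_eq_true_eq]
          omega)]
  exact filter_interval_pyRange (-i) (n - i) 0 n

-- A's filtered anti-diagonal i equals the clamped-range closed form.
theorem anti_diag_eq (n i : Int) :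
    ((PySem.List.pyRange 0 n 1).map (fun fc => (fc, -(fc - i)))).filter (fun P => validaPosicion n P)
      = (PySem.List.pyRange (max 0 (i - n + 1)) (min n (i + 1)) 1).map (fun r => (r, i - r)) := by
  rw [List.filter_map]
  rw [List.filter_congr (q := fun x => decide (i - n + 1 ≤ x ∧ x < i + 1))
      (by intro x hx
          have hb := (PySem.List.mem_pyRange_one).1 hx
          simp only [validaPosicion, Function.comp, Bool.if_false_right, Bool.and_true]
          rw [Bool.eq_iff_iff]
          simp only [Bool.and_eq_true, decide_eq_true_eq]
          omega)]
  rw [filter_interval_pyRange (i - n + 1) (i + 1) 0 n]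
  exact List.map_congr_left (by intro x _; simp [neg_sub])

-- B's bucket for key k: getD of the grouping fold is the ordered list of matching cells.
theorem bucket_getD (key : Int × Int → Int) (cells : List (Int × Int)) (k : Int) :
    (cells.foldl (fun d cell => d.modify (key cell) [] (· ++ [cell])) PySem.Dict.empty).getD k []
      = cells.filter (fun cell => key cell == k) := by
  have h : cells.foldl (fun d cell => d.modify (key cell) [] (· ++ [cell])) PySem.Dict.empty
      = (cells.map (fun cell => (key cell, cell))).foldl
          (fun d p => d.modify p.1 [] (· ++ [p.2])) PySem.Dict.empty := by
    rw [List.foldl_map]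
  rw [h, PySem.Dict.getD_foldl_modify_append, PySem.Dict.getD_empty]
  simp [List.filter_map, List.map_map, Function.comp_def]

-- flatMap of an if-singleton is filter-then-map.
theorem flatMap_if_singleton {α : Type} (l : List Int) (P : Int → Bool) (g : Int → α) :
    l.flatMap (fun r => if P r then [g r] else []) = (l.filter P).map g := by
  induction l with
  | nil => rfl
  | cons x xs ih =>
    by_cases hx : P x
    · simp [List.flatMap_cons, hx, ih]
    · simp [List.flatMap_cons, hx, ih]

-- A row's cells matching a fixed key r ⊙ c = k form at most one cell.
theorem row_filter_eq (n v : Int) :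
    ((PySem.List.pyRange 0 n 1).filter (fun c => decide (c = v)))
      = if 0 ≤ v ∧ v < n then [v] else [] := by
  rw [List.filter_congr (q := fun x => decide (v ≤ x ∧ x < v + 1))
      (by intro x _
          rw [Bool.eq_iff_iff]
          simp only [decide_eq_true_eq]
          omega)]
  rw [filter_interval_pyRange v (v+1) 0 n]
  by_cases h : 0 ≤ v ∧ v < n
  · have h1 : max 0 v = v := by omega
    have h2 : min n (v+1) = v + 1 := by omega
    rw [if_pos h, h1, h2, PySem.List.pyRange_one_singleton]
  · rw [if_neg h, PySem.List.pyRange_one_eq_nil (by omega)]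

-- The main bucket for key d, as a filter over the cell sweep.
theorem bucket_main_eq (n d : Int) :
    (((PySem.List.pyRange 0 n 1).flatMap (fun r => (PySem.List.pyRange 0 n 1).map (fun c => (r, c)))).filter
        (fun cell => (cell.1 - cell.2) == d))
      = (PySem.List.pyRange (max 0 (-d)) (min n (n - d)) 1).map (fun c => (c + d, c)) := by
  rw [List.filter_flatMap]
  have hrow : ∀ r : Int,
      ((PySem.List.pyRange 0 n 1).map (fun c => (r, c))).filter (fun cell => (cell.1 - cell.2) == d)
        = if decide (0 ≤ r - d ∧ r - d < n) then [((r : Int), r - d)] else [] := by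
    intro r
    rw [List.filter_map]
    have : ((PySem.List.pyRange 0 n 1).filter ((fun cell => (cell.1 - cell.2) == d) ∘ (fun c => (r, c))))
        = (PySem.List.pyRange 0 n 1).filter (fun c => decide (c = r - d)) := by
      apply List.filter_congr
      intro x _
      simp only [Function.comp]
      rw [Bool.eq_iff_iff]
      simp only [beq_iff_eq, decide_eq_true_eq]
      omega
    rw [this, row_filter_eq n (r - d)]
    by_cases h : 0 ≤ r - d ∧ r - d < n
    · rw [if_pos h, if_pos (by simpa using h)]
      simp
    · rw [if_neg h, if_neg (by simpa using h)]
      simp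
  rw [List.flatMap_congr (by intro r _; exact hrow r)]
  rw [flatMap_if_singleton (PySem.List.pyRange 0 n 1)
      (fun r => decide (0 ≤ r - d ∧ r - d < n)) (fun r => (r, r - d))]
  rw [List.filter_congr (q := fun x => decide (d ≤ x ∧ x < n + d))
      (by intro x _
          rw [Bool.eq_iff_iff]
          simp only [decide_eq_true_eq]
          omega)]
  rw [filter_interval_pyRange d (n + d) 0 n]
  -- shift the index: r = c + d
  rw [PySem.List.pyRange_one, PySem.List.pyRange_one]
  have hlen : (min n (n + d) - max 0 d).toNat = (min n (n - d) - max 0 (-d)).toNat := by omega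
  rw [hlen, List.map_map, List.map_map]
  apply List.map_congr_left
  intro k _
  simp only [Function.comp]
  have h1 : max 0 d + (k : Int) = max 0 (-d) + (k : Int) + d := by omega
  have h2 : max 0 d + (k : Int) - d = max 0 (-d) + (k : Int) := by omega
  rw [Prod.mk.injEq]
  exact ⟨h1, h2⟩

-- The anti bucket for key s, as a filter over the cell sweep.
theorem bucket_anti_eq (n s : Int) :
    (((PySem.List.pyRange 0 n 1).flatMap (fun r => (PySem.List.pyRange 0 n 1).map (fun c => (r, c)))).filter
        (fun cell => (cell.1 + cell.2) == s))
      = (PySem.List.pyRange (max 0 (s - n + 1)) (min n (s + 1)) 1).map (fun r => (r, s - r)) := by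
  rw [List.filter_flatMap]
  have hrow : ∀ r : Int,
      ((PySem.List.pyRange 0 n 1).map (fun c => (r, c))).filter (fun cell => (cell.1 + cell.2) == s)
        = if decide (0 ≤ s - r ∧ s - r < n) then [((r : Int), s - r)] else [] := by
    intro r
    rw [List.filter_map]
    have : ((PySem.List.pyRange 0 n 1).filter ((fun cell => (cell.1 + cell.2) == s) ∘ (fun c => (r, c))))
        = (PySem.List.pyRange 0 n 1).filter (fun c => decide (c = s - r)) := by
      apply List.filter_congr
      intro x _
      simp only [Function.comp]
      rw [Bool.eq_iff_iff]
      simp only [beq_iff_eq, decide_eq_true_eq]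
      omega
    rw [this, row_filter_eq n (s - r)]
    by_cases h : 0 ≤ s - r ∧ s - r < n
    · rw [if_pos h, if_pos (by simpa using h)]
      simp
    · rw [if_neg h, if_neg (by simpa using h)]
      simp
  rw [List.flatMap_congr (by intro r _; exact hrow r)]
  rw [flatMap_if_singleton (PySem.List.pyRange 0 n 1)
      (fun r => decide (0 ≤ s - r ∧ s - r < n)) (fun r => (r, s - r))]
  rw [List.filter_congr (q := fun x => decide (s - n + 1 ≤ x ∧ x < s + 1))
      (by intro x _
          rw [Bool.eq_iff_iff]
          simp only [decide_eq_true_eq]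
          omega)]
  rw [filter_interval_pyRange (s - n + 1) (s + 1) 0 n]

-- ===== VERDICT (by name: the statement is the Claim_ definition above) =====
theorem generaDiagonales_spec : Claim_equal_generaDiagonales := by
  intro n Longitud complejidad _
  unfold Spec_generaDiagonales generaDiagonales generaDiagonales_alt
  simp only [PySem.List.foldl_append_singleton_eq_map, List.nil_append]
  congr 1
  by_cases hc : complejidad ≠ 1
  · simp only [if_pos hc]
    congr 1
    · apply List.map_congr_left
      intro i _
      rw [main_diag_eq n i, bucket_getD (fun cell => cell.1 - cell.2) _ i, bucket_main_eq n i]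
    · apply List.map_congr_left
      intro i _
      rw [anti_diag_eq n i, bucket_getD (fun cell => cell.1 + cell.2) _ i, bucket_anti_eq n i]
  · simp only [if_neg hc]
    apply List.map_congr_left
    intro i _
    rw [main_diag_eq n i, bucket_getD (fun cell => cell.1 - cell.2) _ i, bucket_main_eq n i]
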